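-- pv_equiv track=rewrite | github.com/yashkk07/PubMed_AST | app.py | deduplicate_records
-- ===== SOURCE A (Python) =====
-- def deduplicate_records(records_before, records_after):
--     # First deduplicate within each dataset
--     before_pmids = {}
--     after_pmids = {}
--
--     # Deduplicate within before dataset
--     for record in records_before:
--         pmid = record.get("PMID", "")
--         if pmid and pmid not in before_pmids:
--             before_pmids[pmid] = record
--
--     # Deduplicate within after dataset
--     for record in records_after:
--         pmid = record.get("PMID", "")
--         if pmid and pmid not in after_pmids:
--             after_pmids[pmid] = record
--
--     # Convert to lists
--     unique_before = list(before_pmids.values())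
--     unique_after = list(after_pmids.values())
--
--     # Now deduplicate between datasets
--     # Before records take precedence
--     pmid_seen = set(before_pmids.keys())
--
--     # Filter after dataset to remove any PMIDs already in before dataset
--     final_after = [record for record in unique_after if record.get("PMID", "") not in pmid_seen]
--
--     return unique_before, final_after
-- ===== SOURCE B (Python) =====
-- def _dedup_pass(records, seen):
--     out = []
--     for record in records:
--         pmid = record.get("PMID", "")
--         if pmid and pmid not in seen:
--             seen.add(pmid)
--             out.append(record)
--     return out
--
--
-- def deduplicate_records(records_before, records_after):
--     pmid_seen = set()
--     unique_before = _dedup_pass(records_before, pmid_seen)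
--     final_after = _dedup_pass(records_after, pmid_seen)
--     return unique_before, final_after
-- ===== Notes on version B (the rewrite author's own statement) =====
-- stated objective: simpler
-- what changed: Replaces the two PMID->record dicts plus a separate cross-dataset filter pass with a single shared seen-set threaded through two guarded append passes, fusing within-after dedup and before-precedence filtering into one traversal.
import Mathlib
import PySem

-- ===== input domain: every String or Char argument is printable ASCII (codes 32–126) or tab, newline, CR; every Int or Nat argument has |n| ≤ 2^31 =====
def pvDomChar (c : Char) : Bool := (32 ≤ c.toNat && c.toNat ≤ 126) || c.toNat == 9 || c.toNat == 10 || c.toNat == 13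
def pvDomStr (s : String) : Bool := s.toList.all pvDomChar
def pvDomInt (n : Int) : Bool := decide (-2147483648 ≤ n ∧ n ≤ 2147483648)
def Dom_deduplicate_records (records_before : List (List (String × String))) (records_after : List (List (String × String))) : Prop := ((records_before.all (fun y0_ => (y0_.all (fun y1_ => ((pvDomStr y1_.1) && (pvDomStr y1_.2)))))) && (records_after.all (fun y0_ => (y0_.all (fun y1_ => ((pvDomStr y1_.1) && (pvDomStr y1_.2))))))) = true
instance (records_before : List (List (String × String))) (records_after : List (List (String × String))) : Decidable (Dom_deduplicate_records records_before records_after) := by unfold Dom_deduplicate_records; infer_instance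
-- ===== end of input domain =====

-- B replaces A's two PMID->record dicts and the separate cross-dataset filter pass by one
-- seen-set threaded through two guarded append passes (objective: simpler).

-- record.get("PMID", "") — first-match association-list lookup (dict convention), shared by both ports
def pvGetPMID (record : List (String × String)) : String :=
  (PySem.Dict.mk record).getD "PMID" ""

-- ===== PORT A =====
def deduplicate_records (records_before : List (List (String × String))) (records_after : List (List (String × String))) : (List (List (String × String))) × (List (List (String × String))) :=
  let before_pmids : PySem.Dict String (List (String × String)) :=
    records_before.foldl (fun d record =>
      let pmid := pvGetPMID record
      if pmid != "" && !(d.contains pmid) then d.insert pmid record else d) PySem.Dict.empty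
  let after_pmids : PySem.Dict String (List (String × String)) :=
    records_after.foldl (fun d record =>
      let pmid := pvGetPMID record
      if pmid != "" && !(d.contains pmid) then d.insert pmid record else d) PySem.Dict.empty
  let unique_before := before_pmids.values
  let unique_after := after_pmids.values
  let pmid_seen : PySem.Set String := PySem.Set.ofList before_pmids.keys
  let final_after := unique_after.filter (fun record => !(PySem.Set.contains pmid_seen (pvGetPMID record)))
  (unique_before, final_after)

-- ===== PORT B =====
def pvDedupPass (records : List (List (String × String))) (seen : PySem.Set String) :
    (List (List (String × String))) × PySem.Set String :=
  records.foldl (fun st record =>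
    let pmid := pvGetPMID record
    if pmid != "" && !(PySem.Set.contains st.2 pmid) then
      (st.1 ++ [record], PySem.Set.add st.2 pmid)
    else st) ([], seen)

def deduplicate_records_alt (records_before : List (List (String × String))) (records_after : List (List (String × String))) : (List (List (String × String))) × (List (List (String × String))) :=
  let p1 := pvDedupPass records_before PySem.Set.empty
  let p2 := pvDedupPass records_after p1.2
  (p1.1, p2.1)

-- ===== PRECONDITION & SPEC =====
def Spec_deduplicate_records (records_before : List (List (String × String))) (records_after : List (List (String × String))) (out : (List (List (String × String))) × (List (List (String × String)))) : Prop := out = deduplicate_records_alt records_before records_after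
instance (records_before : List (List (String × String))) (records_after : List (List (String × String))) (out : (List (List (String × String))) × (List (List (String × String)))) : Decidable (Spec_deduplicate_records records_before records_after out) := by unfold Spec_deduplicate_records; infer_instance

-- ===== CLAIM (what is proved, stated in full; the proofs are below) =====
def Claim_equal_deduplicate_records : Prop := ∀ (records_before : List (List (String × String))) (records_after : List (List (String × String))), Dom_deduplicate_records records_before records_after → Spec_deduplicate_records records_before records_after (deduplicate_records records_before records_after)

-- ===== LEMMAS AND PROOFS =====

-- A's dict-building step and B's pass step, named for the proofs (rfl-equal to the ports' lambdas)
def pvStepA (d : PySem.Dict String (List (String × String))) (record : List (String × String)) :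
    PySem.Dict String (List (String × String)) :=
  let pmid := pvGetPMID record
  if pmid != "" && !(d.contains pmid) then d.insert pmid record else d

def pvStepB (st : (List (List (String × String))) × PySem.Set String) (record : List (String × String)) :
    (List (List (String × String))) × PySem.Set String :=
  let pmid := pvGetPMID record
  if pmid != "" && !(PySem.Set.contains st.2 pmid) then
    (st.1 ++ [record], PySem.Set.add st.2 pmid)
  else st

lemma dict_values_insert (d : PySem.Dict String (List (String × String)))
    (k : String) (v : List (String × String)) (h : d.contains k = false) :
    (d.insert k v).values = d.values ++ [v] := by
  simp [PySem.Dict.values, PySem.Dict.items_insert_of_not_contains d v h]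

-- contains on a Set after add
lemma set_contains_add (s : PySem.Set String) (x k : String) :
    PySem.Set.contains (PySem.Set.add s x) k = (PySem.Set.contains s k || k == x) := by
  by_cases h : k = x
  · subst h
    have hm : k ∈ PySem.Set.add s k := (PySem.Set.mem_add s k k).mpr (Or.inr rfl)
    simp [PySem.Set.contains, hm]
  · have hm : (k ∈ PySem.Set.add s x) ↔ k ∈ s := by
      rw [PySem.Set.mem_add]; simp [h]
    simp [PySem.Set.contains, hm, h]

-- One pass-vs-dict invariant covering both passes: starting from a seen set whose membership
-- is S ∪ keys d, B's pass extends acc exactly by A's dict values filtered by S.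
lemma pass_inv (S : PySem.Set String) (records : List (List (String × String)))
    (d : PySem.Dict String (List (String × String))) (s : PySem.Set String)
    (acc : List (List (String × String)))
    (hC : ∀ k, PySem.Set.contains s k = (PySem.Set.contains S k || d.contains k)) :
    (records.foldl pvStepB (acc ++ d.values.filter (fun r => !(PySem.Set.contains S (pvGetPMID r))), s)).1
      = acc ++ (records.foldl pvStepA d).values.filter (fun r => !(PySem.Set.contains S (pvGetPMID r)))
    ∧ ∀ k, PySem.Set.contains (records.foldl pvStepB (acc ++ d.values.filter (fun r => !(PySem.Set.contains S (pvGetPMID r))), s)).2 k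
      = (PySem.Set.contains S k || (records.foldl pvStepA d).contains k) := by
  induction records generalizing d s with
  | nil => exact ⟨rfl, hC⟩
  | cons r rs ih =>
    simp only [List.foldl_cons]
    by_cases hp : pvGetPMID r = ""
    · have hA : pvStepA d r = d := by simp [pvStepA, hp]
      have hB : ∀ X, pvStepB (X, s) r = (X, s) := by intro X; simp [pvStepB, hp]
      rw [hA, hB]
      exact ih d s hC
    · cases hd : d.contains (pvGetPMID r) with
      | true =>
        have hA : pvStepA d r = d := by simp [pvStepA, hd]
        have hs : PySem.Set.contains s (pvGetPMID r) = true := by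
          rw [hC, hd]; simp
        have hsm : pvGetPMID r ∈ s := by simpa [PySem.Set.contains] using hs
        have hB : ∀ X, pvStepB (X, s) r = (X, s) := by intro X; simp [pvStepB, hsm]
        rw [hA, hB]
        exact ih d s hC
      | false =>
        have hA : pvStepA d r = d.insert (pvGetPMID r) r := by
          simp [pvStepA, hp, hd]
        cases hS : PySem.Set.contains S (pvGetPMID r) with
        | false =>
          -- B appends the record and the pmid; A inserts, and the filter keeps the record
          have hs : PySem.Set.contains s (pvGetPMID r) = false := by
            rw [hC, hS, hd]; rfl
          have hsm : pvGetPMID r ∉ s := by simpa [PySem.Set.contains] using hs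
          have hSm : pvGetPMID r ∉ S := by simpa [PySem.Set.contains] using hS
          have hB : pvStepB (acc ++ d.values.filter (fun r => !(PySem.Set.contains S (pvGetPMID r))), s) r
              = (acc ++ (d.insert (pvGetPMID r) r).values.filter (fun r => !(PySem.Set.contains S (pvGetPMID r))), PySem.Set.add s (pvGetPMID r)) := by
            simp [pvStepB, hp, hsm, hSm, dict_values_insert d _ r hd, List.filter_append, PySem.Set.contains]
          rw [hA, hB]
          refine ih (d.insert (pvGetPMID r) r) (PySem.Set.add s (pvGetPMID r)) ?_
          intro k
          rw [PySem.Dict.contains_insert, set_contains_add, hC k]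
          cases PySem.Set.contains S k <;> cases (k == pvGetPMID r) <;> cases d.contains k <;> rfl
        | true =>
          -- A inserts, but the filter drops the record; B skips it
          have hs : PySem.Set.contains s (pvGetPMID r) = true := by
            rw [hC, hS]; rfl
          have hsm : pvGetPMID r ∈ s := by simpa [PySem.Set.contains] using hs
          have hB : ∀ X, pvStepB (X, s) r = (X, s) := by intro X; simp [pvStepB, hsm]
          have hfilt : (d.insert (pvGetPMID r) r).values.filter (fun r => !(PySem.Set.contains S (pvGetPMID r)))
              = d.values.filter (fun r => !(PySem.Set.contains S (pvGetPMID r))) := by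
            have hSm : pvGetPMID r ∈ S := by simpa [PySem.Set.contains] using hS
            simp [dict_values_insert d _ r hd, List.filter_append, PySem.Set.contains, hSm]
          rw [hA, hB]
          have hres := ih (d.insert (pvGetPMID r) r) s ?_
          · rwa [hfilt] at hres
          · intro k
            rw [PySem.Dict.contains_insert, hC k]
            by_cases hkp : k = pvGetPMID r
            · subst hkp
              rw [hS]; simp
            · have hk : (k == pvGetPMID r) = false := by simp [hkp]
              rw [hk]; simp

-- ===== VERDICT (by name: the statement is the Claim_ definition above) =====
theorem deduplicate_records_spec : Claim_equal_deduplicate_records := by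
  intro rb ra _
  unfold Spec_deduplicate_records
  show ((rb.foldl pvStepA PySem.Dict.empty).values,
        List.filter (fun r => !(PySem.Set.contains (PySem.Set.ofList (PySem.Dict.keys (rb.foldl pvStepA PySem.Dict.empty))) (pvGetPMID r)))
          (ra.foldl pvStepA PySem.Dict.empty).values)
     = ((rb.foldl pvStepB ([], [])).1, (ra.foldl pvStepB ([], (rb.foldl pvStepB ([], [])).2)).1)
  have hC1 : ∀ k : String, PySem.Set.contains ([] : PySem.Set String) k
      = (PySem.Set.contains ([] : PySem.Set String) k || (PySem.Dict.empty : PySem.Dict String (List (String × String))).contains k) := by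
    intro k; rfl
  have h1 := pass_inv [] rb PySem.Dict.empty [] [] hC1
  have h1a : (rb.foldl pvStepB ([], [])).1
      = List.filter (fun r => !(PySem.Set.contains ([] : PySem.Set String) (pvGetPMID r)))
          (rb.foldl pvStepA PySem.Dict.empty).values := h1.1
  have h1b : ∀ k, PySem.Set.contains (rb.foldl pvStepB (([] : List (List (String × String))), ([] : PySem.Set String))).2 k
      = (PySem.Set.contains ([] : PySem.Set String) k || (rb.foldl pvStepA PySem.Dict.empty).contains k) := h1.2
  have hC2 : ∀ k, PySem.Set.contains (rb.foldl pvStepB ([], [])).2 k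
      = (PySem.Set.contains (PySem.Set.ofList (PySem.Dict.keys (rb.foldl pvStepA PySem.Dict.empty))) k
          || (PySem.Dict.empty : PySem.Dict String (List (String × String))).contains k) := by
    intro k
    rw [h1b k]
    show ((rb.foldl pvStepA PySem.Dict.empty).contains k : Bool)
      = (PySem.Set.contains (PySem.Set.ofList (PySem.Dict.keys (rb.foldl pvStepA PySem.Dict.empty))) k || false)
    rw [Bool.or_false]
    cases hFk : (rb.foldl pvStepA PySem.Dict.empty).contains k with
    | true =>
      have hm := (PySem.Dict.contains_iff_mem_keys _ k).mp hFk
      have hm2 : k ∈ PySem.Set.ofList (PySem.Dict.keys (rb.foldl pvStepA PySem.Dict.empty)) :=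
        (PySem.Set.mem_ofList _ _).mpr hm
      simp [PySem.Set.contains, hm2]
    | false =>
      have hm : k ∉ PySem.Dict.keys (rb.foldl pvStepA PySem.Dict.empty) := fun h => by
        rw [(PySem.Dict.contains_iff_mem_keys _ k).mpr h] at hFk; cases hFk
      have hm2 : k ∉ PySem.Set.ofList (PySem.Dict.keys (rb.foldl pvStepA PySem.Dict.empty)) :=
        fun h => hm ((PySem.Set.mem_ofList _ _).mp h)
      simp [PySem.Set.contains, hm2]
  have h2 := pass_inv (PySem.Set.ofList (PySem.Dict.keys (rb.foldl pvStepA PySem.Dict.empty))) ra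
    PySem.Dict.empty (rb.foldl pvStepB ([], [])).2 [] hC2
  have h2a : (ra.foldl pvStepB ([], (rb.foldl pvStepB ([], [])).2)).1
      = List.filter (fun r => !(PySem.Set.contains (PySem.Set.ofList (PySem.Dict.keys (rb.foldl pvStepA PySem.Dict.empty))) (pvGetPMID r)))
          (ra.foldl pvStepA PySem.Dict.empty).values := h2.1
  refine Prod.ext ?_ ?_
  · rw [h1a]
    simp [PySem.Set.contains]
  · rw [h2a]
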